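-- pv_equiv track=rewrite | github.com/jiangzf93/od-solution-python | C_55_consistent/solution.py | solve
-- ===== SOURCE A (Python) =====
-- def solve(inputNum):
--     left, right = 0, 1
--     addResult = 0
--     start = 0
--     minLength = float('inf')
--     while left <= inputNum // 2 and right < inputNum:
--         addResult += right
--         while left < right and addResult > inputNum:
--             addResult -= left
--             left += 1
--         if addResult == inputNum:
--             minLength = min(minLength, right - left + 1)
--             start = left
--         right += 1
--     if start <= 0:
--         return 'N'
--     return str(inputNum) + '=' + '+'.join([str(start+i) for i in range(minLength)])
-- ===== SOURCE B (Python) =====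
-- def solve(inputNum):
--     # Closed-form search: shortest length k such that inputNum is a sum of k
--     # consecutive positive integers; O(sqrt(n)) instead of A's sliding window.
--     k = 2
--     while k * (k + 1) <= 2 * inputNum:
--         num = 2 * inputNum - k * (k - 1)
--         if num % (2 * k) == 0:
--             s = num // (2 * k)
--             return str(inputNum) + '=' + '+'.join(str(s + i) for i in range(k))
--         k += 1
--     return 'N'
-- ===== Notes on version B (the rewrite author's own statement) =====
-- stated objective: faster
-- what changed: Replaces the O(n) sliding-window scan over [1, n) with an O(sqrt(n)) search over the sequence length k, computing the start in closed form as (2n - k(k-1))/(2k) and returning the first (shortest) hit.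
-- intended difference: On inputs whose only decomposition into two or more consecutive positive integers is the one starting at the smallest positive integer, A returns 'N' -- its window for that decomposition records a non-positive start, which the final guard discards -- while B returns the decomposition itself, the intended answer. — e.g. on solve(3): A returns "N", B returns "3=1+2"
import Mathlib
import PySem

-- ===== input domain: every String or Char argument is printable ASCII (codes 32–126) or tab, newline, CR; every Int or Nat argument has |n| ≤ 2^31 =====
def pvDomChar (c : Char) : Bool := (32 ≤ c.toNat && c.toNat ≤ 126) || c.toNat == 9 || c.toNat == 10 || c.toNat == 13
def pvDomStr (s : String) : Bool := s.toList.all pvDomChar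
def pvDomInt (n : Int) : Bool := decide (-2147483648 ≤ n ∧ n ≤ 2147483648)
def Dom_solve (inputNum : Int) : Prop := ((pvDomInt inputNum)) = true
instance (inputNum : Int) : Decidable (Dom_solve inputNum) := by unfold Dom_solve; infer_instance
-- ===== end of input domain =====

-- B replaces A's O(n) sliding window by an O(sqrt(n)) search over the length k with a
-- closed-form start; on inputs whose only decomposition starts at 1, A returns 'N' while B
-- returns that decomposition (see D_solve below).


-- ===== PORT A =====
-- inner 'while left < right and addResult > inputNum' loop; fuel = right - left
def solveShrink (N : Int) : Nat → Int → Int → Int × Int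
  | 0, l, a => (l, a)
  | f+1, l, a => if a > N then solveShrink N f (l+1) (a - l) else (l, a)

-- outer 'while left <= inputNum // 2 and right < inputNum' loop; minLength : Option Int
-- (none = float('inf')); fuel ≥ inputNum - right, so it is never exhausted while the
-- loop condition holds (right increases by 1 each iteration).
def solveLoop (N : Int) : Nat → Int → Int → Int → Int → Option Int → Int × Option Int
  | 0, _l, _r, _a, start, minLen => (start, minLen)
  | f+1, l, r, a, start, minLen =>
    if l ≤ PySem.Int.floordiv N 2 ∧ r < N then
      match solveShrink N (r - l).toNat l (a + r) with
      | (l2, a2) =>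
        if a2 = N then
          solveLoop N f l2 (r+1) a2 l2 (some (match minLen with
            | none => r - l2 + 1
            | some m => min m (r - l2 + 1)))
        else solveLoop N f l2 (r+1) a2 start minLen
    else (start, minLen)

def solve (inputNum : Int) : String :=
  match solveLoop inputNum (inputNum - 1).toNat 0 1 0 0 none with
  | (start, minLen) =>
    if start ≤ 0 then "N"
    else PySem.Int.toStr inputNum ++ "=" ++
      PySem.Str.join "+"
        ((PySem.List.pyRange 0 (minLen.getD 0) 1).map (fun i => PySem.Int.toStr (start + i)))
      -- minLen.getD 0: when start > 0, minLength was always set (proved below); the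
      -- default is on a path Python cannot reach.

-- ===== PORT B =====
-- 'while k * (k + 1) <= 2 * inputNum' loop of Source B; fuel ≥ inputNum + 1 - k
def solveAltLoop (N : Int) : Nat → Int → String
  | 0, _k => "N"
  | f+1, k =>
    if k * (k + 1) ≤ 2 * N then
      if PySem.Int.mod (2 * N - k * (k - 1)) (2 * k) = 0 then
        PySem.Int.toStr N ++ "=" ++
          PySem.Str.join "+"
            ((PySem.List.pyRange 0 k 1).map
              (fun i => PySem.Int.toStr (PySem.Int.floordiv (2 * N - k * (k - 1)) (2 * k) + i)))
      else solveAltLoop N f (k+1)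
    else "N"

def solve_alt (inputNum : Int) : String := solveAltLoop inputNum (inputNum.toNat + 1) 2

-- ===== PRECONDITION & SPEC =====
-- A never reports a decomposition starting at 1 (its window with left = 0 stores start = 0,
-- which the final 'start <= 0' test throws away): on inputs whose ONLY decomposition into
-- ≥ 2 consecutive positive integers starts at 1, A returns 'N' while B returns that
-- decomposition, the intended answer.
def D_solve (inputNum : Int) : Prop :=
  ∃ e ∈ PySem.List.pyRange 2 (min inputNum 65537) 1, e * (e + 1) = 2 * inputNum ∧
    ∀ k ∈ PySem.List.pyRange 2 e 1, ¬ 2 * k ∣ (2 * inputNum - k * (k - 1))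
instance (inputNum : Int) : Decidable (D_solve inputNum) := by unfold D_solve; infer_instance

def Spec_solve (inputNum : Int) (out : String) : Prop := ¬ D_solve inputNum → out = solve_alt inputNum
instance (inputNum : Int) (out : String) : Decidable (Spec_solve inputNum out) := by unfold Spec_solve; infer_instance

def pvDiffWitness_solve : Int := 3
def pvDiffWitnessOut_solve : String × String := ("N", "3=1+2")

-- ===== CLAIM (what is proved, stated in full; the proofs are below) =====
def Claim_unchanged_solve : Prop := ∀ (inputNum : Int), Dom_solve inputNum → Spec_solve inputNum (solve inputNum)
def Claim_changed_solve : Prop := Dom_solve (pvDiffWitness_solve) ∧ D_solve (pvDiffWitness_solve) ∧ solve (pvDiffWitness_solve) = pvDiffWitnessOut_solve.1 ∧ solve_alt (pvDiffWitness_solve) = pvDiffWitnessOut_solve.2 ∧ pvDiffWitnessOut_solve.1 ≠ pvDiffWitnessOut_solve.2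
def Claim_exact_solve : Prop := ∀ (inputNum : Int), Dom_solve inputNum → D_solve inputNum → solve inputNum ≠ solve_alt inputNum

-- ===== LEMMAS AND PROOFS =====

-- N is the sum of the k consecutive integers s, s+1, …, s+k-1  (k ≥ 2, s ≥ 1)
def PRep (N s k : Int) : Prop := 1 ≤ s ∧ 2 ≤ k ∧ 2 * N = k * (2 * s + k - 1)
-- same, with s ≥ 2 — the only decompositions A's window can report
def PGood (N s k : Int) : Prop := 2 ≤ s ∧ 2 ≤ k ∧ 2 * N = k * (2 * s + k - 1)

-- the output string both ports build from start s and length k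
def render (N s k : Int) : String :=
  PySem.Int.toStr N ++ "=" ++
    PySem.Str.join "+" ((PySem.List.pyRange 0 k 1).map (fun i => PySem.Int.toStr (s + i)))

lemma rep_s_eq {N s s' k : Int} (hk : 1 ≤ k)
    (h1 : 2 * N = k * (2 * s + k - 1)) (h2 : 2 * N = k * (2 * s' + k - 1)) : s = s' := by
  have h : k * (2 * s + k - 1) = k * (2 * s' + k - 1) := by omega
  have := mul_left_cancel₀ (by omega : k ≠ 0) h
  omega

-- among decompositions of the same N, a later right end means a shorter length
lemma rep_end_mono {N s1 k1 s2 k2 : Int} (hs1 : 1 ≤ s1) (hk1 : 1 ≤ k1) (hs2 : 1 ≤ s2)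
    (hk2 : 1 ≤ k2) (h1 : 2 * N = k1 * (2 * s1 + k1 - 1)) (h2 : 2 * N = k2 * (2 * s2 + k2 - 1))
    (he : s1 + k1 ≤ s2 + k2) : k2 ≤ k1 := by
  by_contra h
  push Not at h
  nlinarith [mul_pos (by omega : (0:Int) < k1) (by omega : (0:Int) < k2)]

lemma rep_same_end {N s1 k1 s2 k2 : Int} (hs1 : 1 ≤ s1) (hk1 : 1 ≤ k1) (hs2 : 1 ≤ s2)
    (hk2 : 1 ≤ k2) (h1 : 2 * N = k1 * (2 * s1 + k1 - 1)) (h2 : 2 * N = k2 * (2 * s2 + k2 - 1))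
    (he : s1 + k1 = s2 + k2) : k1 = k2 ∧ s1 = s2 := by
  have ha : k2 ≤ k1 := rep_end_mono hs1 hk1 hs2 hk2 h1 h2 (le_of_eq he)
  have hb : k1 ≤ k2 := rep_end_mono hs2 hk2 hs1 hk1 h2 h1 (le_of_eq he.symm)
  have hk : k1 = k2 := le_antisymm hb ha
  subst hk
  exact ⟨rfl, rep_s_eq (by omega) h1 h2⟩

lemma rep_end_mono_strict {N s1 k1 s2 k2 : Int} (hs1 : 1 ≤ s1) (hk1 : 1 ≤ k1) (hs2 : 1 ≤ s2)
    (hk2 : 1 ≤ k2) (h1 : 2 * N = k1 * (2 * s1 + k1 - 1)) (h2 : 2 * N = k2 * (2 * s2 + k2 - 1))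
    (he : s1 + k1 < s2 + k2) : k2 < k1 := by
  have ha : k2 ≤ k1 := rep_end_mono hs1 hk1 hs2 hk2 h1 h2 (le_of_lt he)
  rcases lt_or_eq_of_le ha with h | h
  · exact h
  · subst h
    have := rep_s_eq (by omega : (1:Int) ≤ k2) h1 h2
    omega

lemma shrink_spec (N r : Int) : ∀ (f : Nat) (l a : Int),
    0 ≤ l → l + (f : Int) = r → 2 * a = r * (r + 1) - (l - 1) * l →
    ∃ l' a', solveShrink N f l a = (l', a') ∧ l ≤ l' ∧ l' ≤ r ∧
      2 * a' = r * (r + 1) - (l' - 1) * l' ∧ (a' ≤ N ∨ l' = r) ∧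
      (∀ m, l ≤ m → m < l' → 2 * N < r * (r + 1) - (m - 1) * m) := by
  intro f
  induction f with
  | zero =>
    intro l a hl0 hlr ha
    refine ⟨l, a, rfl, le_refl l, by omega, ha, Or.inr (by omega), by omega⟩
  | succ f ih =>
    intro l a hl0 hlr ha
    show ∃ l' a', (if a > N then solveShrink N f (l+1) (a - l) else (l, a)) = _ ∧ _
    by_cases hgt : a > N
    · rw [if_pos hgt]
      obtain ⟨l', a', heq, h1, h2, h3, h4, h5⟩ :=
        ih (l+1) (a - l) (by omega) (by push_cast at hlr ⊢; omega) (by ring_nf; ring_nf at ha; omega)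
      refine ⟨l', a', heq, by omega, h2, h3, h4, ?_⟩
      intro m hm1 hm2
      rcases eq_or_lt_of_le hm1 with h | h
      · subst h; omega
      · exact h5 m (by omega) hm2
    · rw [if_neg hgt]
      exact ⟨l, a, rfl, le_refl l, by push_cast at hlr; omega, ha, Or.inl (by omega), by omega⟩

-- what (start, minLength) mean after all windows with right end ≤ R have been examined
def RecState (N R start : Int) (minLen : Option Int) : Prop :=
  (start = 0 ∧ minLen = none ∧ (∀ s k, PGood N s k → ¬ (s + k - 1 ≤ R)) ∧
    (∀ e, 2 ≤ e → e ≤ R → e * (e + 1) ≠ 2 * N))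
  ∨ (start = 0 ∧ (∃ e, 2 ≤ e ∧ e ≤ R ∧ e * (e + 1) = 2 * N ∧ minLen = some (e + 1)) ∧
      (∀ s k, PGood N s k → ¬ (s + k - 1 ≤ R)))
  ∨ (∃ s k, PGood N s k ∧ s + k - 1 ≤ R ∧ start = s ∧ minLen = some k ∧
      (∀ s' k', PGood N s' k' → s' + k' - 1 ≤ R → k ≤ k'))

def LoopOut (N start' : Int) (minLen' : Option Int) : Prop :=
  (start' = 0 ∧ ∀ s k, ¬ PGood N s k)
  ∨ (∃ s k, PGood N s k ∧ start' = s ∧ minLen' = some k ∧ ∀ s' k', PGood N s' k' → k ≤ k')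

lemma exit_spec (N l r start : Int) (minLen : Option Int)
    (hl0 : 0 ≤ l) (hlr : l < r)
    (hmax : ∀ m, 0 ≤ m → m < l → 2 * N < (r - 1) * r - (m - 1) * m)
    (hrec : RecState N (r - 1) start minLen)
    (hstop : PySem.Int.floordiv N 2 < l ∨ N ≤ r) :
    LoopOut N start minLen := by
  have hfd : PySem.Int.floordiv N 2 = N / 2 := PySem.Int.floordiv_eq_ediv_of_pos (by norm_num)
  have hhi : ∀ s k, PGood N s k → s + k - 1 ≤ r - 1 := by
    intro s k hg
    obtain ⟨hs, hk, he⟩ := hg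
    by_contra hcon
    push Not at hcon
    rcases hstop with hstop | hstop
    · rw [hfd] at hstop
      by_cases hsl : s < l
      · have h1 := hmax s (by omega) hsl
        have h2 : (r-1)*r ≤ (s+k-1)*(s+k) :=
          mul_le_mul (by omega) (by omega) (by omega) (by omega)
        have h3 : (s+k-1)*(s+k) - (s-1)*s = 2*N := by linear_combination -he
        linarith
      · have h2 : N + 1 ≤ 2*s := by omega
        have h4 : 2*(2*s+1) ≤ k*(2*s+k-1) :=
          mul_le_mul (by omega) (by omega) (by omega) (by omega)
        linarith
    · have h3 : 2*N - 2*(s+k-1) = 2*s*(k-1) + (k-1)*(k-2) := by linear_combination he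
      have e1 : (0:Int) ≤ (k-1)*(k-2) := mul_nonneg (by omega) (by omega)
      have e2 : 2*1*(k-1) ≤ 2*s*(k-1) :=
        mul_le_mul_of_nonneg_right (by omega) (by omega)
      omega
  rcases hrec with ⟨h0, _, hng, _⟩ | ⟨h0, _, hng⟩ | ⟨s, k, hg, _, hst, hml, hmin⟩
  · exact Or.inl ⟨h0, fun s k hg => hng s k hg (hhi s k hg)⟩
  · exact Or.inl ⟨h0, fun s k hg => hng s k hg (hhi s k hg)⟩
  · exact Or.inr ⟨s, k, hg, hst, hml, fun s' k' hg' => hmin s' k' hg' (hhi s' k' hg')⟩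

lemma loop_spec (N : Int) : ∀ (f : Nat) (l r a start : Int) (minLen : Option Int),
    0 ≤ l → l < r → 2 * a = (r - 1) * r - (l - 1) * l →
    (∀ m, 0 ≤ m → m < l → 2 * N < (r - 1) * r - (m - 1) * m) →
    N ≤ r + (f : Int) →
    RecState N (r - 1) start minLen →
    LoopOut N (solveLoop N f l r a start minLen).1 (solveLoop N f l r a start minLen).2 := by
  intro f
  induction f with
  | zero =>
    intro l r a start minLen hl0 hlr ha hmax hfuel hrec
    exact exit_spec N l r start minLen hl0 hlr hmax hrec (Or.inr (by push_cast at hfuel; omega))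
  | succ f ih =>
    intro l r a start minLen hl0 hlr ha hmax hfuel hrec
    simp only [solveLoop]
    by_cases hc : l ≤ PySem.Int.floordiv N 2 ∧ r < N
    case neg =>
      rw [if_neg hc]
      rcases not_and_or.mp hc with h | h
      · exact exit_spec N l r start minLen hl0 hlr hmax hrec (Or.inl (lt_of_not_ge h))
      · exact exit_spec N l r start minLen hl0 hlr hmax hrec (Or.inr (le_of_not_gt h))
    case pos =>
      rw [if_pos hc]
      obtain ⟨hcl, hcr⟩ := hc
      obtain ⟨l2, a2, heq, hll2, hl2r, h2a2, hstop2, hbetween⟩ :=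
        shrink_spec N r ((r - l).toNat) l (a + r) hl0 (by omega) (by linear_combination ha)
      rw [heq]
      dsimp only
      have hr1 : 1 ≤ r := by omega
      have H3' : ∀ m, 0 ≤ m → m < l2 → 2 * N < r * (r + 1) - (m - 1) * m := by
        intro m hm0 hml2
        by_cases hml : m < l
        · have h1 := hmax m hm0 hml
          nlinarith
        · exact hbetween m (by omega) hml2
      have hfuel' : N ≤ (r + 1) + (f : Int) := by push_cast at hfuel ⊢; omega
      have hmax' : ∀ m, 0 ≤ m → m < l2 → 2 * N < ((r+1) - 1) * (r+1) - (m - 1) * m := by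
        intro m h1 h2
        have e : ((r+1) - 1) * (r+1) = r * (r+1) := by ring
        rw [e]; exact H3' m h1 h2
      have ha' : 2 * a2 = ((r+1) - 1) * (r+1) - (l2 - 1) * l2 := by linear_combination h2a2
      have hrm : r + 1 - 1 = r := by ring
      by_cases ha2 : a2 = N
      · rw [if_pos ha2]
        have hl2lt : l2 < r := by
          rcases lt_or_eq_of_le hl2r with h | h
          · exact h
          · exfalso
            subst h
            have : 2 * a2 = 2 * l2 := by linear_combination h2a2
            omega
        have hNeq : 2 * N = r * (r + 1) - (l2 - 1) * l2 := by rw [← ha2]; exact h2a2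
        by_cases hl2big : 2 ≤ l2
        · -- records a decomposition starting at l2 ≥ 2
          have hgood : PGood N l2 (r - l2 + 1) := ⟨hl2big, by omega, by linear_combination hNeq⟩
          have hminend : ∀ s' k', PGood N s' k' → s' + k' - 1 ≤ r → r - l2 + 1 ≤ k' := by
            intro s' k' hg' hle'
            obtain ⟨hs', hk', he'⟩ := hg'
            rcases lt_or_eq_of_le hle' with hlt | heqe
            · have hklt := rep_end_mono_strict (by omega : 1 ≤ s') (by omega : 1 ≤ k')
                (by omega : (1:Int) ≤ l2) (by omega : 1 ≤ r - l2 + 1)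
                he' hgood.2.2 (by omega)
              omega
            · have := rep_same_end (by omega : (1:Int) ≤ l2) (by omega : 1 ≤ r - l2 + 1)
                (by omega : 1 ≤ s') (by omega : 1 ≤ k') hgood.2.2 he' (by omega)
              omega
          have hRS : RecState N (r + 1 - 1) l2 (some (r - l2 + 1)) := by
            rw [hrm]
            refine Or.inr (Or.inr ⟨l2, r - l2 + 1, hgood, by omega, rfl, rfl, ?_⟩)
            intro s' k' hg' hle'
            rcases lt_or_eq_of_le hle' with hlt | heqe
            · rcases hrec with ⟨h0, hml, hng, htri⟩ | ⟨h0, he0, hng⟩ |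
                ⟨sp, kp, hgp, hep, hsp, hmlp, hminp⟩
              · exact absurd (by omega) (hng s' k' hg')
              · exact absurd (by omega) (hng s' k' hg')
              · obtain ⟨hsp2, hkp2, hep2⟩ := hgp
                have h5 := hminp s' k' hg' (by omega)
                have hklt := rep_end_mono_strict (by omega : 1 ≤ sp) (by omega : 1 ≤ kp)
                  (by omega : (1:Int) ≤ l2) (by omega : 1 ≤ r - l2 + 1)
                  hep2 hgood.2.2 (by omega)
                omega
            · exact hminend s' k' hg' (by omega)
          rcases hrec with ⟨h0, hml, hng, htri⟩ | ⟨h0, ⟨e0, he02, he0le, he0N, hml⟩, hng⟩ |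
            ⟨sp, kp, hgp, hep, hsp, hmlp, hminp⟩
          · subst hml
            dsimp only
            exact ih l2 (r+1) a2 l2 _ (by omega) (by omega) ha' hmax' hfuel' hRS
          · subst hml
            dsimp only
            have hrep0 : PRep N 1 e0 := ⟨le_refl 1, he02, by linear_combination -he0N⟩
            have hklt : r - l2 + 1 < e0 := rep_end_mono_strict (by omega : (1:Int) ≤ 1)
              (by omega : 1 ≤ e0) (by omega : (1:Int) ≤ l2) (by omega : 1 ≤ r - l2 + 1)
              hrep0.2.2 hgood.2.2 (by omega)
            rw [min_eq_right (by omega : r - l2 + 1 ≤ e0 + 1)]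
            exact ih l2 (r+1) a2 l2 _ (by omega) (by omega) ha' hmax' hfuel' hRS
          · subst hmlp
            dsimp only
            obtain ⟨hsp2, hkp2, hep2⟩ := hgp
            have hklt : r - l2 + 1 < kp := rep_end_mono_strict (by omega : 1 ≤ sp)
              (by omega : 1 ≤ kp) (by omega : (1:Int) ≤ l2) (by omega : 1 ≤ r - l2 + 1)
              hep2 hgood.2.2 (by omega)
            rw [min_eq_right (by omega : r - l2 + 1 ≤ kp)]
            exact ih l2 (r+1) a2 l2 _ (by omega) (by omega) ha' hmax' hfuel' hRS
        · -- the window starts at 0: Python records start = 0 (and length right+1)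
          have hl20 : l2 = 0 := by
            rcases (by omega : l2 = 0 ∨ l2 = 1) with h | h
            · exact h
            · exfalso
              have h1 := H3' 0 (le_refl 0) (by omega)
              have hz : ((0:Int) - 1) * 0 = 0 := by ring
              rw [hz] at h1
              subst h
              have : 2 * N = r * (r + 1) := by linear_combination hNeq
              linarith
          subst hl20
          have h2N : 2 * N = r * (r + 1) := by linear_combination hNeq
          have hr2 : 2 ≤ r := by
            rcases (by omega : r = 1 ∨ 2 ≤ r) with h | h
            · exfalso; subst h; norm_num at h2N; omega
            · exact h
          have hrep1 : PRep N 1 r := ⟨le_refl 1, hr2, by linear_combination h2N⟩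
          rcases hrec with ⟨h0, hml, hng, htri⟩ | ⟨h0, ⟨e0, he02, he0le, he0N, hml⟩, hng⟩ |
            ⟨sp, kp, hgp, hep, hsp, hmlp, hminp⟩
          · subst hml
            dsimp only
            refine ih 0 (r+1) a2 0 _ (by omega) (by omega) ha' hmax' hfuel' ?_
            rw [hrm]
            refine Or.inr (Or.inl ⟨rfl, ⟨r, hr2, le_refl r, by linear_combination -h2N,
              by norm_num⟩, ?_⟩)
            intro s' k' hg' hle'
            obtain ⟨hs', hk', he'⟩ := hg'
            rcases lt_or_eq_of_le hle' with hlt | heqe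
            · exact hng s' k' ⟨hs', hk', he'⟩ (by omega)
            · have := rep_same_end (by omega : (1:Int) ≤ 1) (by omega : 1 ≤ r)
                (by omega : 1 ≤ s') (by omega : 1 ≤ k') hrep1.2.2 he' (by omega)
              omega
          · exfalso
            have : e0 * (e0 + 1) < r * (r + 1) := by nlinarith
            omega
          · exfalso
            obtain ⟨hsp2, hkp2, hep2⟩ := hgp
            have hklt : r < kp := rep_end_mono_strict (by omega : 1 ≤ sp) (by omega : 1 ≤ kp)
              (by omega : (1:Int) ≤ 1) (by omega : 1 ≤ r) hep2 hrep1.2.2 (by omega)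
            omega
      · rw [if_neg ha2]
        have hnogood_r : ∀ s' k', PGood N s' k' → s' + k' - 1 ≠ r := by
          intro s' k' hg' hEnd
          obtain ⟨hs', hk', he'⟩ := hg'
          by_cases hsl2 : s' < l2
          · have h1 := H3' s' (by omega) hsl2
            have hid : r * (r + 1) - (s' - 1) * s' = 2 * N := by
              rw [← hEnd]; linear_combination -he'
            linarith
          · rcases hstop2 with hle | heqr
            · have hmono : (l2 - 1) * l2 ≤ (s' - 1) * s' := by nlinarith
              have hid : 2 * N = r * (r + 1) - (s' - 1) * s' := by
                rw [← hEnd]; linear_combination he'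
              have : a2 = N := by linarith
              exact ha2 this
            · omega
        have htri_r : ¬ (r * (r + 1) = 2 * N) := by
          intro h2N
          by_cases h1l2 : 2 ≤ l2
          · have h1 := H3' 1 (by omega) (by omega)
            have hz : ((1:Int) - 1) * 1 = 0 := by ring
            rw [hz] at h1
            linarith
          · have hz : (l2 - 1) * l2 = 0 := by
              rcases (by omega : l2 = 0 ∨ l2 = 1) with h | h <;> subst h <;> ring
            have : a2 = N := by linarith
            exact ha2 this
        refine ih l2 (r+1) a2 start minLen (by omega) (by omega) ha' hmax' hfuel' ?_
        rw [hrm]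
        rcases hrec with ⟨h0, hml, hng, htri⟩ | ⟨h0, ⟨e0, he02, he0le, he0N, hml⟩, hng⟩ |
          ⟨sp, kp, hgp, hep, hsp, hmlp, hminp⟩
        · refine Or.inl ⟨h0, hml, ?_, ?_⟩
          · intro s' k' hg' hle'
            rcases lt_or_eq_of_le hle' with hlt | heqe
            · exact hng s' k' hg' (by omega)
            · exact hnogood_r s' k' hg' (by omega)
          · intro e he2 her heq2
            rcases lt_or_eq_of_le her with hlt | heqe
            · exact htri e he2 (by omega) heq2
            · subst heqe; exact htri_r heq2
        · refine Or.inr (Or.inl ⟨h0, ⟨e0, he02, by omega, he0N, hml⟩, ?_⟩)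
          intro s' k' hg' hle'
          rcases lt_or_eq_of_le hle' with hlt | heqe
          · exact hng s' k' hg' (by omega)
          · exact hnogood_r s' k' hg' (by omega)
        · refine Or.inr (Or.inr ⟨sp, kp, hgp, by omega, hsp, hmlp, ?_⟩)
          intro s' k' hg' hle'
          rcases lt_or_eq_of_le hle' with hlt | heqe
          · exact hminp s' k' hg' (by omega)
          · exact absurd (by omega : s' + k' - 1 = r) (hnogood_r s' k' hg')

lemma solve_char (N : Int) : LoopOut N (solveLoop N (N - 1).toNat 0 1 0 0 none).1
    (solveLoop N (N - 1).toNat 0 1 0 0 none).2 := by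
  refine loop_spec N (N - 1).toNat 0 1 0 0 none (le_refl 0) (by omega) (by norm_num)
    (by intro m h1 h2; omega) (by omega) ?_
  refine Or.inl ⟨rfl, rfl, ?_, ?_⟩
  · intro s k ⟨hs, hk, _⟩ h
    omega
  · intro e he2 hele
    omega

lemma solve_eq_of_good (N s k : Int) (hg : PGood N s k)
    (hmin : ∀ s' k', PGood N s' k' → k ≤ k') : solve N = render N s k := by
  have hchar := solve_char N
  unfold solve
  rcases hEq : solveLoop N (N - 1).toNat 0 1 0 0 none with ⟨st, ml⟩
  rw [hEq] at hchar
  dsimp only at hchar ⊢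
  rcases hchar with ⟨h0, hnog⟩ | ⟨s0, k0, hg0, hst, hml, hmin0⟩
  · exact absurd hg (hnog s k)
  · have hk : k0 = k := le_antisymm (hmin0 s k hg) (hmin s0 k0 hg0)
    have hs : s0 = s := by
      subst hk
      exact rep_s_eq (by have := hg0.2.1; omega) hg0.2.2 hg.2.2
    rw [hst, hml, hk, hs, if_neg (by have := hg.1; omega : ¬ s ≤ 0)]
    rfl

lemma solve_eq_N (N : Int) (h : ∀ s k, ¬ PGood N s k) : solve N = "N" := by
  have hchar := solve_char N
  unfold solve
  rcases hEq : solveLoop N (N - 1).toNat 0 1 0 0 none with ⟨st, ml⟩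
  rw [hEq] at hchar
  dsimp only at hchar ⊢
  rcases hchar with ⟨h0, _⟩ | ⟨s0, k0, hg0, _, _, _⟩
  · rw [if_pos (by omega)]
  · exact absurd hg0 (h s0 k0)

lemma altLoop_spec (N : Int) : ∀ (f : Nat) (k : Int), 2 ≤ k → N + 1 ≤ k + (f : Int) →
    (∀ s' k', PRep N s' k' → ¬ (k' < k)) →
    (∃ s k', PRep N s k' ∧ solveAltLoop N f k = render N s k' ∧
        (∀ s'' k'', PRep N s'' k'' → k' ≤ k''))
    ∨ (solveAltLoop N f k = "N" ∧ ∀ s' k', ¬ PRep N s' k') := by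
  intro f
  induction f with
  | zero =>
    intro k hk hfuel hno
    refine Or.inr ⟨rfl, ?_⟩
    intro s' k' ⟨hs', hk', he'⟩
    refine hno s' k' ⟨hs', hk', he'⟩ ?_
    -- every decomposition has k'*(k'+1) ≤ 2N < k*(k+1)
    have h1 : k' * (k' + 1) ≤ k' * (2 * s' + k' - 1) :=
      mul_le_mul_of_nonneg_left (by omega) (by omega)
    push_cast at hfuel
    nlinarith
  | succ f ih =>
    intro k hk hfuel hno
    simp only [solveAltLoop]
    by_cases hg : k * (k + 1) ≤ 2 * N
    · rw [if_pos hg]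
      by_cases hd : PySem.Int.mod (2 * N - k * (k - 1)) (2 * k) = 0
      · rw [if_pos hd]
        obtain ⟨t, hnum⟩ := (PySem.Int.mod_eq_zero_iff_dvd _ _).mp hd
        have hsv : PySem.Int.floordiv (2 * N - k * (k - 1)) (2 * k) = t := by
          rw [PySem.Int.floordiv_eq_ediv_of_pos (by omega : (0:Int) < 2 * k), hnum]
          exact Int.mul_ediv_cancel_left t (by omega : (2:Int) * k ≠ 0)
        have ht1 : 1 ≤ t := by
          have h1 : 2 * k * 1 ≤ 2 * k * t := by nlinarith
          exact le_of_mul_le_mul_left h1 (by omega : (0:Int) < 2 * k)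
        refine Or.inl ⟨t, k, ⟨ht1, hk, by linear_combination hnum⟩, ?_, ?_⟩
        · unfold render
          rw [hsv]
        · intro s'' k'' hrep
          have := hno s'' k'' hrep
          omega
      · rw [if_neg hd]
        refine ih (k + 1) (by omega) (by push_cast at hfuel ⊢; omega) ?_
        intro s' k' hrep hlt
        rcases (by omega : k' < k ∨ k' = k) with h | h
        · exact hno s' k' hrep h
        · subst h
          obtain ⟨hs', hk', he'⟩ := hrep
          exact hd ((PySem.Int.mod_eq_zero_iff_dvd _ _).mpr ⟨s', by linear_combination he'⟩)
    · rw [if_neg hg]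
      refine Or.inr ⟨rfl, ?_⟩
      intro s' k' ⟨hs', hk', he'⟩
      refine hno s' k' ⟨hs', hk', he'⟩ ?_
      by_contra hcon
      push Not at hcon
      have h1 : k' * (k' + 1) ≤ k' * (2 * s' + k' - 1) :=
        mul_le_mul_of_nonneg_left (by omega) (by omega)
      have h2 : k * (k + 1) ≤ k' * (k' + 1) :=
        mul_le_mul (by omega) (by omega) (by omega) (by omega)
      omega

lemma alt_char (N : Int) :
    (∃ s k, PRep N s k ∧ solve_alt N = render N s k ∧ (∀ s' k', PRep N s' k' → k ≤ k'))
    ∨ (solve_alt N = "N" ∧ ∀ s k, ¬ PRep N s k) := by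
  have h := altLoop_spec N (N.toNat + 1) 2 (le_refl 2) (by push_cast; omega)
    (by intro s' k' ⟨_, hk', _⟩ hlt; omega)
  exact h

-- a PRep with minimal length, coexisting with any PGood, starts at 2 or more
lemma min_rep_start_ge_two (N s k s' k' : Int) (h : PRep N s k)
    (hmin : ∀ s'' k'', PRep N s'' k'' → k ≤ k'') (hg : PGood N s' k') : 2 ≤ s := by
  obtain ⟨hs1, hk2, he⟩ := h
  obtain ⟨hs'2, hk'2, he'⟩ := hg
  by_contra hcon
  have hs : s = 1 := by omega
  subst hs
  have hkk' : k ≤ k' := hmin s' k' ⟨by omega, hk'2, he'⟩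
  rcases lt_or_eq_of_le hkk' with hlt | heq
  · have := rep_end_mono (by omega : (1:Int) ≤ 1) (by omega : 1 ≤ k)
      (by omega : 1 ≤ s') (by omega : 1 ≤ k') he he' (by omega)
    omega
  · subst heq
    have := rep_s_eq (by omega : (1:Int) ≤ k) he he'
    omega

lemma D_iff (N : Int) (hDom : N ≤ 2147483648) :
    D_solve N ↔ (∃ s k, PRep N s k) ∧ (∀ s k, ¬ PGood N s k) := by
  unfold D_solve
  constructor
  · rintro ⟨e, hmem, h2n, hnok⟩
    rw [PySem.List.mem_pyRange_one] at hmem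
    have hrep1 : 2 * N = e * (2 * 1 + e - 1) := by linear_combination -h2n
    refine ⟨⟨1, e, le_refl 1, by omega, hrep1⟩, ?_⟩
    intro s' k' ⟨hs', hk', he'⟩
    have hklt : k' < e := by
      by_cases hcmp : s' + k' < 1 + e
      · exfalso
        have := rep_end_mono_strict (by omega : 1 ≤ s') (by omega : 1 ≤ k')
          (by omega : (1:Int) ≤ 1) (by omega : 1 ≤ e) he' hrep1 hcmp
        omega
      · have hle := rep_end_mono (by omega : (1:Int) ≤ 1) (by omega : 1 ≤ e)
          (by omega : 1 ≤ s') (by omega : 1 ≤ k') hrep1 he' (by omega)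
        rcases lt_or_eq_of_le hle with h | h
        · exact h
        · exfalso
          subst h
          have := rep_s_eq (by omega : (1:Int) ≤ k') hrep1 he'
          omega
    refine hnok k' ?_ ⟨s', by linear_combination he'⟩
    rw [PySem.List.mem_pyRange_one]
    omega
  · rintro ⟨⟨s, k, hs1, hk2, he⟩, hnogood⟩
    have hs_eq1 : s = 1 := by
      by_contra h
      exact hnogood s k ⟨by omega, hk2, he⟩
    subst hs_eq1
    refine ⟨k, ?_, by linear_combination -he, ?_⟩
    · rw [PySem.List.mem_pyRange_one]
      have hb1 : k < N := by nlinarith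
      have hb2 : k < 65537 := by nlinarith
      omega
    · intro k' hmem hdvd
      rw [PySem.List.mem_pyRange_one] at hmem
      obtain ⟨t, hnum⟩ := hdvd
      have ht2 : 2 ≤ t := by
        have h2 : 2 * k' * 2 ≤ 2 * k' * t := by nlinarith
        exact le_of_mul_le_mul_left h2 (by omega : (0:Int) < 2 * k')
      exact hnogood t k' ⟨ht2, by omega, by linear_combination hnum⟩

-- ===== VERDICT (by name: the statement is the Claim_ definition above) =====
theorem solve_spec : Claim_unchanged_solve := by
  intro N hdom hND
  have hDom : N ≤ 2147483648 := by
    have := of_decide_eq_true hdom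
    exact this.2
  rcases alt_char N with ⟨s, k, hrep, hBeq, hmin⟩ | ⟨hBN, hnorep⟩
  · by_cases hgood_ex : ∃ s' k', PGood N s' k'
    · obtain ⟨s', k', hg'⟩ := hgood_ex
      have hs2 : 2 ≤ s := min_rep_start_ge_two N s k s' k' hrep hmin hg'
      have hgood : PGood N s k := ⟨hs2, hrep.2.1, hrep.2.2⟩
      have hA := solve_eq_of_good N s k hgood
        (fun s'' k'' hg'' => hmin s'' k'' ⟨by have := hg''.1; omega, hg''.2.1, hg''.2.2⟩)
      rw [hA, hBeq]
    · exfalso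
      refine hND ((D_iff N hDom).mpr ⟨⟨s, k, hrep⟩, ?_⟩)
      intro s' k' hg'
      exact hgood_ex ⟨s', k', hg'⟩
  · have hA : solve N = "N" := by
      refine solve_eq_N N ?_
      intro s k hg
      exact hnorep s k ⟨by have := hg.1; omega, hg.2.1, hg.2.2⟩
    rw [hA, hBN]

theorem solve_changed : Claim_changed_solve := by
  unfold Claim_changed_solve; decide

theorem solve_tight : Claim_exact_solve := by
  intro N hdom hD
  have hDom : N ≤ 2147483648 := by
    have := of_decide_eq_true hdom
    exact this.2
  obtain ⟨⟨s0, k0, hrep0⟩, hnogood⟩ := (D_iff N hDom).mp hD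
  have hA : solve N = "N" := solve_eq_N N hnogood
  rcases alt_char N with ⟨s, k, hrep, hBeq, hmin⟩ | ⟨_, hnorep⟩
  · rw [hA, hBeq]
    intro hcon
    have hmem : '=' ∈ ("N" : String).toList := by
      rw [hcon]
      unfold render
      simp only [String.toList_append]
      simp
    simp at hmem
  · exact absurd hrep0 (hnorep s0 k0)
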